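-- pv_equiv track=rewrite | github.com/ThomasZumsteg/adventofcode2015 | day17.py | part2
-- ===== SOURCE A (Python) =====
-- def storage_gen(buckets, volume):
--     queue = [(0, [])]
--     while queue:
--         i, used = queue.pop()
--         if sum(used) == volume:
--             yield tuple(used)
--         elif sum(used) < volume and i < len(buckets):
--             queue.append((i+1, used + [buckets[i]]))
--             queue.append((i+1, used))
--
-- def part2(buckets, volume=150):
--     shortest = []
--     for b in storage_gen(buckets, volume):
--         if shortest == [] or len(b) < len(shortest[0]):
--             shortest = [b]
--         elif len(b) == len(shortest[0]):
--             shortest.append(b)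
--     return len(shortest)
-- ===== SOURCE B (Python) =====
-- def part2(buckets, volume=150):
--     # DP: merge partial selections by (sum, size); 'live' states have sum < volume,
--     # states hitting sum == volume are tallied per size in results.
--     n = len(buckets)
--     states = {(0, 0): 1}          # (sum, size) -> number of partial selections
--     results = {}                  # size -> number of subsets reaching volume
--     for i in range(n + 1):
--         new = {}
--         for (s, k), c in states.items():
--             if s == volume:
--                 results[k] = results.get(k, 0) + c
--             elif s < volume and i < n:
--                 b = buckets[i]
--                 new[(s + b, k + 1)] = new.get((s + b, k + 1), 0) + c
--                 new[(s, k)] = new.get((s, k), 0) + c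
--         states = new
--     if not results:
--         return 0
--     return results[min(results)]
-- ===== Notes on version B (the rewrite author's own statement) =====
-- stated objective: alternative
-- what changed: Replaces the exponential explicit-stack enumeration of all qualifying subsets (collecting the tuples themselves) by a dynamic program that merges partial selections into a dict keyed by (sum, size) and tallies completed subsets per size, returning the tally of the minimal size.
import Mathlib
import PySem

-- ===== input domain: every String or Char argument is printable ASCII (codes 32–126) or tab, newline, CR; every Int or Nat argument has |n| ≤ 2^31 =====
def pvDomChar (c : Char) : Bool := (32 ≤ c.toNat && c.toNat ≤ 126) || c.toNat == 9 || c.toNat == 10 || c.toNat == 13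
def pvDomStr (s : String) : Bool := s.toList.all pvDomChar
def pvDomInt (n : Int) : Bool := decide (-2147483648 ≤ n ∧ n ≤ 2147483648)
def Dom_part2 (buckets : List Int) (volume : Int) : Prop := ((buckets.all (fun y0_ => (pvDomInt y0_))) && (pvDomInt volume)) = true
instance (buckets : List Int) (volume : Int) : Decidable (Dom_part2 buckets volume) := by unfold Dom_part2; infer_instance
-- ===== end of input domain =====

-- B replaces A's exponential stack enumeration of subsets by a dict-based DP over (sum, size) states; return values proved equal.

-- ===== PORT A =====
-- storage_gen: explicit stack (Python list, pop/append at the end = head of the Lean list), yields in pop order.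
def pvRunA (bs : List Int) (v : Int) : List (Nat × List Int) → List (List Int)
  | [] => []
  | (i, u) :: q =>
    if u.sum = v then u :: pvRunA bs v q
    else if h : u.sum < v ∧ i < bs.length then
      -- buckets[i] is in range here (i < len), so getD is exact
      pvRunA bs v ((i + 1, u) :: (i + 1, u ++ [bs.getD i 0]) :: q)
    else pvRunA bs v q
termination_by q => (q.map (fun p => 3 ^ (bs.length + 1 - p.1))).sum
decreasing_by
  · simp only [List.map_cons, List.sum_cons]
    have : 0 < 3 ^ (bs.length + 1 - i) := Nat.pow_pos (by omega)
    omega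
  · simp only [List.map_cons, List.sum_cons]
    have h1 : bs.length + 1 - (i + 1) = bs.length - i := by omega
    have h2 : bs.length + 1 - i = (bs.length - i) + 1 := by omega
    rw [h1, h2, pow_succ]
    have : 0 < 3 ^ (bs.length - i) := Nat.pow_pos (by omega)
    omega
  · simp only [List.map_cons, List.sum_cons]
    have : 0 < 3 ^ (bs.length + 1 - i) := Nat.pow_pos (by omega)
    omega

-- the loop body updating `shortest`
def pvUpd (shortest : List (List Int)) (b : List Int) : List (List Int) :=
  if shortest = [] ∨ b.length < (shortest.headD []).length then [b]
  else if b.length = (shortest.headD []).length then shortest ++ [b]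
  else shortest

def part2 (buckets : List Int) (volume : Int) : Int :=
  (((pvRunA buckets volume [(0, [])]).foldl pvUpd []).length : Int)

-- ===== PORT B =====
-- inner-loop body of Source B: one state ((s, k), c) processed into (new, results)
def pvInner (buckets : List Int) (volume : Int) (i : Int)
    (q : PySem.Dict (Int × Int) Int × PySem.Dict Int Int)
    (st : (Int × Int) × Int) : PySem.Dict (Int × Int) Int × PySem.Dict Int Int :=
  if st.1.1 = volume then
    (q.1, q.2.insert st.1.2 (q.2.getD st.1.2 0 + st.2))
  else if st.1.1 < volume ∧ i < (buckets.length : Int) then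
    let b := PySem.List.pyGetD buckets i 0
    let d1 := q.1.insert (st.1.1 + b, st.1.2 + 1) (q.1.getD (st.1.1 + b, st.1.2 + 1) 0 + st.2)
    (d1.insert (st.1.1, st.1.2) (d1.getD (st.1.1, st.1.2) 0 + st.2), q.2)
  else q

def part2_alt (buckets : List Int) (volume : Int) : Int :=
  let final := (PySem.List.pyRange 0 ((buckets.length : Int) + 1) 1).foldl
    (fun st i => st.1.items.foldl (pvInner buckets volume i) (PySem.Dict.empty, st.2))
    (PySem.Dict.ofList [((0, 0), 1)], PySem.Dict.empty)
  if final.2.items = [] then 0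
  else final.2.getD ((PySem.List.min? final.2.keys (fun k => k)).getD 0) 0

-- ===== PRECONDITION & SPEC =====
def Spec_part2 (buckets : List Int) (volume : Int) (out : Int) : Prop := out = part2_alt buckets volume
instance (buckets : List Int) (volume : Int) (out : Int) : Decidable (Spec_part2 buckets volume out) := by unfold Spec_part2; infer_instance

-- ===== CLAIM (what is proved, stated in full; the proofs are below) =====
def Claim_equal_part2 : Prop := ∀ (buckets : List Int) (volume : Int), Dom_part2 buckets volume → Spec_part2 buckets volume (part2 buckets volume)


-- ===== LEMMAS AND PROOFS =====

-- recursive form of A's generator (one state expanded depth-first)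
def genA (bs : List Int) (v : Int) (i : Nat) (u : List Int) : List (List Int) :=
  if u.sum = v then [u]
  else if h : u.sum < v ∧ i < bs.length then
    genA bs v (i + 1) u ++ genA bs v (i + 1) (u ++ [bs.getD i 0])
  else []
termination_by bs.length - i
decreasing_by all_goals omega

-- the multiset of SIZES of generated subsets, as a function of (i, running sum, running size)
def gS (bs : List Int) (v : Int) (i : Nat) (s k : Int) : List Int :=
  if s = v then [k]
  else if h : s < v ∧ i < bs.length then
    gS bs v (i + 1) s k ++ gS bs v (i + 1) (s + bs.getD i 0) (k + 1)
  else []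
termination_by bs.length - i
decreasing_by all_goals omega

-- count of the minimum in a nonempty list (0 on [])
def pvAns : List Int → Int
  | [] => 0
  | a :: r => ((a :: r).count (r.foldl min a) : Int)

lemma runA_flatten (bs : List Int) (v : Int) (q : List (Nat × List Int)) :
    pvRunA bs v q = (q.map (fun p => genA bs v p.1 p.2)).flatten := by
  fun_induction pvRunA bs v q with
  | case1 => simp
  | case2 i u q hy ih =>
    simp only [List.map_cons, List.flatten_cons]
    rw [genA, if_pos hy, ih]
    simp
  | case3 i u q hy h ih =>
    rw [ih]
    simp only [List.map_cons, List.flatten_cons]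
    conv_rhs => rw [genA, if_neg hy, dif_pos h]
    simp [List.append_assoc]
  | case4 i u q hy h ih =>
    rw [ih]
    simp only [List.map_cons, List.flatten_cons]
    conv_rhs => rw [genA, if_neg hy, dif_neg h]
    simp

lemma map_len_genA (bs : List Int) (v : Int) (i : Nat) (u : List Int) :
    (genA bs v i u).map (fun x => (x.length : Int)) = gS bs v i u.sum u.length := by
  fun_induction genA bs v i u with
  | case1 i u h =>
    rw [gS, if_pos h]
    simp
  | case2 i u h hc ih1 ih2 =>
    rw [gS, if_neg h, dif_pos hc]
    rw [List.map_append, ih1, ih2]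
    simp [List.sum_append, List.length_append]
  | case3 i u h hc =>
    rw [gS, if_neg h, dif_neg hc]
    simp

lemma pvFoldl_min_le {α : Type} [LinearOrder α] (l : List α) (a : α) : l.foldl min a ≤ a := by
  induction l generalizing a with
  | nil => simp
  | cons b t ih => exact le_trans (ih (min a b)) (min_le_left a b)

lemma pvFoldl_min_mem {α : Type} [LinearOrder α] (r : List α) (a : α) : r.foldl min a ∈ a :: r := by
  induction r generalizing a with
  | nil => simp
  | cons b t ih =>
    simp only [List.foldl_cons]
    rcases List.mem_cons.1 (ih (min a b)) with h | h
    · rw [h]; rcases min_choice a b with h3 | h3 <;> rw [h3] <;> simp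
    · simp [h]

lemma pvFoldl_min_le_mem {α : Type} [LinearOrder α] (r : List α) (a : α) :
    ∀ x ∈ a :: r, r.foldl min a ≤ x := by
  induction r generalizing a with
  | nil => intro x hx; simp only [List.mem_singleton] at hx; simp [hx]
  | cons b t ih =>
    intro x hx
    simp only [List.foldl_cons]
    simp only [List.mem_cons] at hx
    rcases hx with h | h | h
    · exact le_trans (le_trans (pvFoldl_min_le t (min a b)) (min_le_left a b)) (le_of_eq h.symm)
    · exact le_trans (le_trans (pvFoldl_min_le t (min a b)) (min_le_right a b)) (le_of_eq h.symm)
    · exact ih (min a b) x (List.mem_cons_of_mem _ h)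

lemma pvFoldUpd (ys : List (List Int)) : ∀ (acc : List (List Int)) (m : Nat),
    acc ≠ [] → (∀ x ∈ acc, x.length = m) →
    (ys.foldl pvUpd acc).length
      = (if m = (ys.map List.length).foldl min m then acc.length else 0)
        + (ys.map List.length).count ((ys.map List.length).foldl min m) := by
  induction ys with
  | nil =>
    intro acc m h1 h2
    simp
  | cons b t ih =>
    intro acc m h1 h2
    have hhead : (acc.headD []).length = m := by
      match acc, h1 with
      | a :: r, _ => exact h2 a (by simp)
    simp only [List.foldl_cons, List.map_cons]
    rcases lt_trichotomy b.length m with hb | hb | hb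
    · have hupd : pvUpd acc b = [b] := by
        unfold pvUpd
        rw [hhead, if_pos (Or.inr hb)]
      rw [hupd]
      simp only [min_eq_right (le_of_lt hb)]
      rw [ih [b] b.length (by simp) (by simp)]
      have hMle : (t.map List.length).foldl min b.length ≤ b.length := pvFoldl_min_le _ _
      have hne : ¬ (m = (t.map List.length).foldl min b.length) := by omega
      rw [if_neg hne, List.count_cons]
      simp only [beq_iff_eq, List.length_cons, List.length_nil]
      split_ifs <;> omega
    · have hupd : pvUpd acc b = acc ++ [b] := by
        unfold pvUpd
        rw [hhead, if_neg (by simp [h1, hb]), if_pos hb]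
      rw [hupd]
      simp only [hb, min_self]
      rw [ih (acc ++ [b]) m (by simp)
        (by
          intro x hx
          rcases List.mem_append.1 hx with h | h
          · exact h2 x h
          · simp only [List.mem_singleton] at h
            rw [h, hb])]
      rw [List.count_cons, List.length_append]
      simp only [beq_iff_eq, List.length_cons, List.length_nil]
      split_ifs <;> omega
    · have hupd : pvUpd acc b = acc := by
        unfold pvUpd
        rw [hhead, if_neg (by simp [h1]; omega), if_neg (by omega)]
      rw [hupd]
      simp only [min_eq_left (le_of_lt hb)]
      rw [ih acc m h1 h2]
      have hMle : (t.map List.length).foldl min m ≤ m := pvFoldl_min_le _ _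
      rw [List.count_cons]
      simp only [beq_iff_eq]
      split_ifs <;> omega

lemma pvFoldl_min_cast (l : List Nat) (a : Nat) :
    (l.map (Nat.cast : Nat → Int)).foldl min (↑a) = ↑(l.foldl min a) := by
  induction l generalizing a with
  | nil => simp
  | cons b t ih => simpa [Nat.cast_min] using ih (min a b)

lemma pvCount_cast (l : List Nat) (a : Nat) :
    (l.map (Nat.cast : Nat → Int)).count (↑a) = l.count a :=
  List.count_map_of_injective l _ Nat.cast_injective a

lemma part2_eq_ans (bs : List Int) (v : Int) : part2 bs v = pvAns (gS bs v 0 0 0) := by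
  have hg : gS bs v 0 0 0 = (genA bs v 0 []).map (fun x => (x.length : Int)) := by
    rw [map_len_genA]
    simp
  unfold part2
  rw [show pvRunA bs v [(0, [])] = genA bs v 0 [] by rw [runA_flatten]; simp, hg]
  cases hcase : genA bs v 0 [] with
  | nil => simp [pvAns]
  | cons b t =>
    rw [List.foldl_cons, show pvUpd [] b = [b] by unfold pvUpd; simp]
    rw [pvFoldUpd t [b] b.length (by simp) (by simp)]
    simp only [List.map_cons, pvAns]
    rw [show (t.map (fun x => (x.length : Int))) = (t.map List.length).map (Nat.cast : Nat → Int) by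
      simp [List.map_map, Function.comp]]
    rw [pvFoldl_min_cast, List.count_cons, pvCount_cast]
    simp only [beq_iff_eq, List.length_cons, List.length_nil, Nat.cast_inj]
    have hMle : (t.map List.length).foldl min b.length ≤ b.length := pvFoldl_min_le _ _
    push_cast
    split_ifs <;> omega

-- ---------- B side ----------

def pvPos {κ : Type} [BEq κ] (d : PySem.Dict κ Int) : Prop := ∀ p ∈ d.items, 0 < p.2

def pvTot (bs : List Int) (v : Int) (i : Nat) (d : PySem.Dict (Int × Int) Int) (k : Int) : Int :=
  (d.items.map (fun q => q.2 * ((gS bs v i q.1.1 q.1.2).count k : Int))).sum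

lemma pvSumReplace {κ : Type} [BEq κ] [LawfulBEq κ] (f : κ → Int) (a : κ) (v c : Int) :
    ∀ (l : List (κ × Int)), (l.map Prod.fst).Nodup → (a, v) ∈ l →
    ((l.map (fun p => if p.1 == a then (a, v + c) else p)).map (fun p => p.2 * f p.1)).sum
      = (l.map (fun p => p.2 * f p.1)).sum + c * f a := by
  intro l
  induction l with
  | nil => intro _ h; simp at h
  | cons p t ih =>
    intro hnd hmem
    obtain ⟨p1, p2⟩ := p
    simp only [List.map_cons, List.nodup_cons] at hnd
    rcases List.mem_cons.1 hmem with h | h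
    · injection h with h1 h2
      subst h1
      subst h2
      have htid : t.map (fun q => if q.1 == a then (a, v + c) else q) = t := by
        have hid : ∀ q ∈ t, (if q.1 == a then (a, v + c) else q) = q := by
          intro q hq
          have hne : q.1 ≠ a := by
            intro hqa
            exact hnd.1 (by rw [← hqa]; exact List.mem_map_of_mem hq)
          simp [hne]
        rw [List.map_congr_left hid]
        simp
      simp only [List.map_cons, beq_self_eq_true, if_true, htid, List.sum_cons]
      ring
    · have hpa : p1 ≠ a := by
        intro hqa
        apply hnd.1
        rw [hqa]
        exact List.mem_map_of_mem h
      have hbeq : (p1 == a) = false := by simp [hpa]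
      simp only [List.map_cons, hbeq, Bool.false_eq_true, if_false, List.sum_cons]
      rw [ih hnd.2 h]
      ring

lemma pvSumInsert {κ : Type} [BEq κ] [LawfulBEq κ] (d : PySem.Dict κ Int) (hnd : d.keys.Nodup)
    (a : κ) (c : Int) (f : κ → Int) :
    ((d.insert a (d.getD a 0 + c)).items.map (fun p => p.2 * f p.1)).sum
      = (d.items.map (fun p => p.2 * f p.1)).sum + c * f a := by
  cases hc : d.contains a with
  | false =>
    rw [PySem.Dict.items_insert_of_not_contains d _ hc, PySem.Dict.getD_of_not_contains d _ hc]
    simp only [List.map_append, List.sum_append, List.map_cons, List.map_nil, List.sum_cons,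
      List.sum_nil]
    ring
  | true =>
    have hk : a ∈ d.keys := (PySem.Dict.contains_iff_mem_keys d a).1 (by simpa using hc)
    rcases List.mem_map.1 hk with ⟨p, hp, hpk⟩
    have hmem : (a, p.2) ∈ d.items := by rw [← hpk]; simpa using hp
    have hget : d.getD a 0 = p.2 :=
      PySem.Dict.getD_of_mem_items (d := d) (k := a) (v := p.2) hmem hnd (d0 := 0)
    rw [PySem.Dict.items_insert_of_contains d _ hc, hget]
    exact pvSumReplace f a p.2 c d.items hnd hmem

lemma pvTotInsert (bs : List Int) (v : Int) (i : Nat) (d : PySem.Dict (Int × Int) Int)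
    (hnd : d.keys.Nodup) (a1 a2 c k : Int) :
    pvTot bs v i (d.insert (a1, a2) (d.getD (a1, a2) 0 + c)) k
      = pvTot bs v i d k + c * ((gS bs v i a1 a2).count k : Int) :=
  pvSumInsert d hnd (a1, a2) c (fun x => ((gS bs v i x.1 x.2).count k : Int))

lemma pvGetD_nonneg {κ : Type} [BEq κ] (d : PySem.Dict κ Int) (h : pvPos d) (k : κ) :
    0 ≤ d.getD k 0 := by
  rw [PySem.Dict.getD_eq_get?_getD]
  cases hq : d.get? k with
  | none => simp
  | some w =>
    rcases Option.map_eq_some_iff.1 hq with ⟨p, hf, hw⟩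
    have := h p (List.mem_of_find?_eq_some hf)
    simp only [Option.getD_some]
    omega

lemma pvPos_insert {κ : Type} [BEq κ] [LawfulBEq κ] (d : PySem.Dict κ Int) (h : pvPos d)
    (a : κ) (c : Int) (hc : 0 < c) : pvPos (d.insert a (d.getD a 0 + c)) := by
  intro p hp
  rcases (PySem.Dict.mem_items_insert d a _ p).1 hp with h1 | ⟨h1, _⟩
  · have := pvGetD_nonneg d h a
    subst h1; simp only; omega
  · exact h p h1

lemma pvGetD_pos_of_mem_keys {κ : Type} [BEq κ] [LawfulBEq κ] (d : PySem.Dict κ Int)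
    (hnd : d.keys.Nodup) (hpos : pvPos d) (k : κ) (hk : k ∈ d.keys) : 0 < d.getD k 0 := by
  rcases List.mem_map.1 hk with ⟨p, hp, hpk⟩
  have := PySem.Dict.getD_of_mem_items (d := d) (k := p.1) (v := p.2) (by simpa using hp) hnd (d0 := 0)
  subst hpk; rw [this]; exact hpos p hp

lemma pvMem_keys_of_getD_ne {κ : Type} [BEq κ] [LawfulBEq κ] (d : PySem.Dict κ Int) (k : κ)
    (h : d.getD k 0 ≠ 0) : k ∈ d.keys := by
  by_contra hk
  have hc : d.contains k = false := by
    by_contra hcc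
    exact hk ((PySem.Dict.contains_iff_mem_keys d k).1 (by simpa using hcc))
  exact h (PySem.Dict.getD_of_not_contains d 0 hc)

lemma pvInnerFold (bs : List Int) (v : Int) (j : Nat) :
    ∀ (l : List ((Int × Int) × Int)) (dn : PySem.Dict (Int × Int) Int) (dr : PySem.Dict Int Int),
    (∀ p ∈ l, 0 < p.2) → pvPos dn → pvPos dr → dn.keys.Nodup → dr.keys.Nodup →
    pvPos (l.foldl (pvInner bs v (↑j)) (dn, dr)).1 ∧
    pvPos (l.foldl (pvInner bs v (↑j)) (dn, dr)).2 ∧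
    (l.foldl (pvInner bs v (↑j)) (dn, dr)).1.keys.Nodup ∧
    (l.foldl (pvInner bs v (↑j)) (dn, dr)).2.keys.Nodup ∧
    ∀ k, (l.foldl (pvInner bs v (↑j)) (dn, dr)).2.getD k 0
          + pvTot bs v (j + 1) (l.foldl (pvInner bs v (↑j)) (dn, dr)).1 k
        = dr.getD k 0 + pvTot bs v (j + 1) dn k
          + (l.map (fun p => p.2 * ((gS bs v j p.1.1 p.1.2).count k : Int))).sum := by
  intro l
  induction l with
  | nil =>
    intro dn dr hl h1 h2 h3 h4
    exact ⟨h1, h2, h3, h4, fun k => by simp⟩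
  | cons p t ih =>
    intro dn dr hl h1 h2 h3 h4
    have hp2 : 0 < p.2 := hl p (by simp)
    have hl' : ∀ q ∈ t, 0 < q.2 := fun q hq => hl q (by simp [hq])
    by_cases hs : p.1.1 = v
    · have hstep : pvInner bs v (↑j) (dn, dr) p
          = (dn, dr.insert p.1.2 (dr.getD p.1.2 0 + p.2)) := by
        unfold pvInner
        rw [if_pos hs]
      rw [List.foldl_cons, hstep]
      obtain ⟨c1, c2, c3, c4, c5⟩ := ih dn (dr.insert p.1.2 (dr.getD p.1.2 0 + p.2)) hl' h1
        (pvPos_insert dr h2 _ _ hp2) h3 (PySem.Dict.nodup_keys_insert _ _ _ h4)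
      refine ⟨c1, c2, c3, c4, fun k => ?_⟩
      rw [c5 k, PySem.Dict.getD_insert]
      have hgs : gS bs v j p.1.1 p.1.2 = [p.1.2] := by rw [gS, if_pos hs]
      rw [List.map_cons, List.sum_cons, hgs]
      by_cases hke : k = p.1.2
      · subst hke
        simp only [List.count_cons, List.count_nil, beq_self_eq_true, if_true]
        push_cast
        ring
      · have h2k : (p.1.2 == k) = false := by
          simp only [beq_eq_false_iff_ne, ne_eq]
          exact fun hh => hke hh.symm
        simp only [if_neg hke, List.count_cons, List.count_nil, h2k, Bool.false_eq_true, if_false]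
        push_cast
        ring
    · by_cases hlt : p.1.1 < v ∧ (j : Int) < (bs.length : Int)
      · have hltn : p.1.1 < v ∧ j < bs.length := ⟨hlt.1, by exact_mod_cast hlt.2⟩
        have hb : PySem.List.pyGetD bs (↑j) 0 = bs.getD j 0 := by simp
        have hstep : pvInner bs v (↑j) (dn, dr) p
            = ((dn.insert (p.1.1 + bs.getD j 0, p.1.2 + 1)
                  (dn.getD (p.1.1 + bs.getD j 0, p.1.2 + 1) 0 + p.2)).insert (p.1.1, p.1.2)
                ((dn.insert (p.1.1 + bs.getD j 0, p.1.2 + 1)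
                  (dn.getD (p.1.1 + bs.getD j 0, p.1.2 + 1) 0 + p.2)).getD (p.1.1, p.1.2) 0 + p.2),
               dr) := by
          unfold pvInner
          rw [if_neg hs, if_pos hlt, hb]
        rw [List.foldl_cons, hstep]
        set d1 := dn.insert (p.1.1 + bs.getD j 0, p.1.2 + 1)
            (dn.getD (p.1.1 + bs.getD j 0, p.1.2 + 1) 0 + p.2) with hd1
        set d2 := d1.insert (p.1.1, p.1.2) (d1.getD (p.1.1, p.1.2) 0 + p.2) with hd2
        have hd1pos : pvPos d1 := pvPos_insert dn h1 _ _ hp2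
        have hd1nd : d1.keys.Nodup := PySem.Dict.nodup_keys_insert _ _ _ h3
        obtain ⟨c1, c2, c3, c4, c5⟩ := ih d2 dr hl' (pvPos_insert d1 hd1pos _ _ hp2) h2
          (PySem.Dict.nodup_keys_insert _ _ _ hd1nd) h4
        refine ⟨c1, c2, c3, c4, fun k => ?_⟩
        rw [c5 k]
        have htot : pvTot bs v (j + 1) d2 k
            = pvTot bs v (j + 1) dn k
              + p.2 * ((gS bs v (j + 1) (p.1.1 + bs.getD j 0) (p.1.2 + 1)).count k : Int)
              + p.2 * ((gS bs v (j + 1) p.1.1 p.1.2).count k : Int) := by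
          rw [hd2, pvTotInsert bs v (j + 1) d1 hd1nd, hd1, pvTotInsert bs v (j + 1) dn h3]
        have hgs : gS bs v j p.1.1 p.1.2
            = gS bs v (j + 1) p.1.1 p.1.2 ++ gS bs v (j + 1) (p.1.1 + bs.getD j 0) (p.1.2 + 1) := by
          rw [gS, if_neg hs, dif_pos hltn]
        rw [htot, List.map_cons, List.sum_cons, hgs, List.count_append]
        push_cast
        ring
      · have hstep : pvInner bs v (↑j) (dn, dr) p = (dn, dr) := by
          unfold pvInner
          rw [if_neg hs, if_neg hlt]
        rw [List.foldl_cons, hstep]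
        obtain ⟨c1, c2, c3, c4, c5⟩ := ih dn dr hl' h1 h2 h3 h4
        refine ⟨c1, c2, c3, c4, fun k => ?_⟩
        rw [c5 k]
        have hgs : gS bs v j p.1.1 p.1.2 = [] := by
          rw [gS, if_neg hs, dif_neg]
          intro hcon
          exact hlt ⟨hcon.1, by exact_mod_cast hcon.2⟩
        rw [List.map_cons, List.sum_cons, hgs]
        simp [add_assoc]

lemma pvInnerEmpty (bs : List Int) (v : Int) (i : Int) (hi : ¬ i < (bs.length : Int)) :
    ∀ (l : List ((Int × Int) × Int)) (dr : PySem.Dict Int Int),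
    (l.foldl (pvInner bs v i) (PySem.Dict.empty, dr)).1 = PySem.Dict.empty := by
  intro l
  induction l with
  | nil => intro dr; rfl
  | cons p t ih =>
    intro dr
    have hstep : ∃ dr2, pvInner bs v i (PySem.Dict.empty, dr) p = (PySem.Dict.empty, dr2) := by
      unfold pvInner
      split_ifs with h1 h2
      · exact ⟨_, rfl⟩
      · exact absurd h2.2 hi
      · exact ⟨_, rfl⟩
    obtain ⟨dr2, hd⟩ := hstep
    rw [List.foldl_cons, hd]
    exact ih dr2

lemma pvOuter (bs : List Int) (v : Int) (m : Nat) :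
    pvPos ((List.range m).foldl (fun st j => (st.1.items.foldl (pvInner bs v (↑j)) (PySem.Dict.empty, st.2))) (PySem.Dict.ofList [((0, 0), 1)], PySem.Dict.empty)).1 ∧
    pvPos ((List.range m).foldl (fun st j => (st.1.items.foldl (pvInner bs v (↑j)) (PySem.Dict.empty, st.2))) (PySem.Dict.ofList [((0, 0), 1)], PySem.Dict.empty)).2 ∧
    ((List.range m).foldl (fun st j => (st.1.items.foldl (pvInner bs v (↑j)) (PySem.Dict.empty, st.2))) (PySem.Dict.ofList [((0, 0), 1)], PySem.Dict.empty)).1.keys.Nodup ∧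
    ((List.range m).foldl (fun st j => (st.1.items.foldl (pvInner bs v (↑j)) (PySem.Dict.empty, st.2))) (PySem.Dict.ofList [((0, 0), 1)], PySem.Dict.empty)).2.keys.Nodup ∧
    ∀ k, ((List.range m).foldl (fun st j => (st.1.items.foldl (pvInner bs v (↑j)) (PySem.Dict.empty, st.2))) (PySem.Dict.ofList [((0, 0), 1)], PySem.Dict.empty)).2.getD k 0
          + pvTot bs v m ((List.range m).foldl (fun st j => (st.1.items.foldl (pvInner bs v (↑j)) (PySem.Dict.empty, st.2))) (PySem.Dict.ofList [((0, 0), 1)], PySem.Dict.empty)).1 k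
        = ((gS bs v 0 0 0).count k : Int) := by
  induction m with
  | zero =>
    have hit : (PySem.Dict.ofList [(((0 : Int), (0 : Int)), (1 : Int))]).items
        = [((0, 0), 1)] := by decide
    simp only [List.range_zero, List.foldl_nil]
    refine ⟨?_, ?_, ?_, ?_, ?_⟩
    · intro p hp
      rw [hit] at hp
      simp only [List.mem_singleton] at hp
      rw [hp]
      norm_num
    · intro p hp
      simp only [show (PySem.Dict.empty : PySem.Dict Int Int).items = [] from rfl] at hp
      cases hp
    · decide
    · exact PySem.Dict.nodup_keys_empty
    · intro k
      rw [PySem.Dict.getD_empty]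
      simp [pvTot, hit]
  | succ m ihm =>
    rw [List.range_succ, List.foldl_append, List.foldl_cons, List.foldl_nil]
    obtain ⟨i1, i2, i3, i4, i5⟩ := ihm
    set E := (List.range m).foldl
      (fun st j => st.1.items.foldl (pvInner bs v (↑j)) (PySem.Dict.empty, st.2))
      (PySem.Dict.ofList [((0, 0), 1)], PySem.Dict.empty) with hE
    obtain ⟨c1, c2, c3, c4, c5⟩ := pvInnerFold bs v m E.1.items PySem.Dict.empty E.2 i1
      (fun p hp => by simp only [show (PySem.Dict.empty : PySem.Dict (Int × Int) Int).items = [] from rfl] at hp; cases hp)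
      i2 PySem.Dict.nodup_keys_empty i4
    refine ⟨c1, c2, c3, c4, fun k => ?_⟩
    rw [c5 k]
    have hz : pvTot bs v (m + 1) PySem.Dict.empty k = 0 := by
      simp [pvTot, show (PySem.Dict.empty : PySem.Dict (Int × Int) Int).items = [] from rfl]
    rw [hz]
    have hsum : (E.1.items.map (fun p => p.2 * ((gS bs v m p.1.1 p.1.2).count k : Int))).sum
        = pvTot bs v m E.1 k := rfl
    rw [hsum, ← i5 k]
    ring

lemma part2_alt_eq_ans (bs : List Int) (v : Int) : part2_alt bs v = pvAns (gS bs v 0 0 0) := by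
  have hrange : PySem.List.pyRange 0 ((bs.length : Int) + 1) 1
      = List.map (fun k : Nat => (k : Int)) (List.range (bs.length + 1)) := by
    have h := PySem.List.pyRange_zero_nat (bs.length + 1)
    rw [Nat.cast_add, Nat.cast_one] at h
    exact h
  set F := (PySem.List.pyRange 0 ((bs.length : Int) + 1) 1).foldl
    (fun st i => st.1.items.foldl (pvInner bs v i) (PySem.Dict.empty, st.2))
    (PySem.Dict.ofList [((0, 0), 1)], PySem.Dict.empty) with hF
  set G := (List.range (bs.length + 1)).foldl
    (fun st j => st.1.items.foldl (pvInner bs v (↑j)) (PySem.Dict.empty, st.2))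
    (PySem.Dict.ofList [((0, 0), 1)], PySem.Dict.empty) with hG
  have hstart : part2_alt bs v
      = (if F.2.items = [] then 0
         else F.2.getD ((PySem.List.min? F.2.keys (fun k => k)).getD 0) 0) := rfl
  have hFG : F = G := by
    rw [hF, hG, hrange, List.foldl_map]
  rw [hstart, hFG]
  obtain ⟨o1, o2, o3, o4, o5⟩ := pvOuter bs v (bs.length + 1)
  rw [← hG] at o1 o2 o3 o4 o5
  have hempty : G.1 = PySem.Dict.empty := by
    rw [hG, List.range_succ, List.foldl_append, List.foldl_cons, List.foldl_nil]
    exact pvInnerEmpty bs v (↑bs.length) (lt_irrefl _) _ _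
  have hgetD : ∀ k, G.2.getD k 0 = ((gS bs v 0 0 0).count k : Int) := by
    intro k
    have h := o5 k
    rw [hempty] at h
    simpa [pvTot, show (PySem.Dict.empty : PySem.Dict (Int × Int) Int).items = [] from rfl] using h
  cases hg : gS bs v 0 0 0 with
  | nil =>
    have hitems : G.2.items = [] := by
      cases hit : G.2.items with
      | nil => rfl
      | cons p r =>
        have hmem : (p.1, p.2) ∈ G.2.items := by rw [hit]; simp
        have := PySem.Dict.getD_of_mem_items (d := G.2) (k := p.1) (v := p.2) hmem o4 (d0 := 0)
        have hpos : 0 < p.2 := o2 p (by rw [hit]; simp)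
        rw [hgetD p.1, hg] at this
        simp at this
        omega
    rw [if_pos hitems]
    simp [pvAns]
  | cons a r =>
    have hMmem : r.foldl min a ∈ a :: r := pvFoldl_min_mem r a
    have hcntM : 0 < (a :: r).count (r.foldl min a) := List.count_pos_iff.2 hMmem
    have hgM : G.2.getD (r.foldl min a) 0 ≠ 0 := by
      rw [hgetD, hg]
      exact_mod_cast Nat.pos_iff_ne_zero.1 hcntM
    have hkeys : r.foldl min a ∈ G.2.keys := pvMem_keys_of_getD_ne _ _ hgM
    have hne : G.2.items ≠ [] := by
      intro h
      rw [show G.2.keys = G.2.items.map Prod.fst from rfl, h] at hkeys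
      cases hkeys
    rw [if_neg hne]
    cases hmin : PySem.List.min? G.2.keys (fun k => k) with
    | none =>
      rw [(PySem.List.min?_eq_none_iff _ _).1 hmin] at hkeys
      cases hkeys
    | some m =>
      have hm_mem : m ∈ G.2.keys := PySem.List.min?_mem hmin
      have hMm : m ≤ r.foldl min a := PySem.List.min?_isMin hmin _ hkeys
      have hmM : r.foldl min a ≤ m := by
        have hpos : 0 < G.2.getD m 0 := pvGetD_pos_of_mem_keys G.2 o4 o2 m hm_mem
        rw [hgetD, hg] at hpos
        have : 0 < (a :: r).count m := by exact_mod_cast hpos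
        exact pvFoldl_min_le_mem r a m (List.count_pos_iff.1 this)
      have heq : m = r.foldl min a := le_antisymm hMm hmM
      simp only [Option.getD_some, heq]
      rw [hgetD, hg]
      simp [pvAns]

-- ===== VERDICT (by name: the statement is the Claim_ definition above) =====
theorem part2_spec : Claim_equal_part2 := by
  intro buckets volume _
  show part2 buckets volume = part2_alt buckets volume
  rw [part2_eq_ans, part2_alt_eq_ans]
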